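-- pv_equiv track=rewrite | github.com/aditya4232/Talentradar-System | backend/app/services/ai_engine.py | skills_match
-- ===== SOURCE A (Python) =====
-- SKILL_SYNONYMS = {
--     "react": ["reactjs", "react.js", "react js", "react 18", "react18"],
--     "node": ["nodejs", "node.js", "node js"],
--     "javascript": ["js", "es6", "es2015", "ecmascript", "vanilla js"],
--     "typescript": ["ts"],
--     "python": ["python3", "python 3"],
--     "machine learning": ["ml", "machine-learning"],
--     "artificial intelligence": ["ai", "deep learning", "dl"],
--     "kubernetes": ["k8s"],
--     "postgresql": ["postgres", "pg"],
--     "mongodb": ["mongo"],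
--     "amazon web services": ["aws", "amazon aws"],
--     "google cloud": ["gcp", "google cloud platform"],
--     "microsoft azure": ["azure"],
--     "spring boot": ["springboot", "spring"],
--     "angular": ["angularjs", "angular.js"],
--     "vue": ["vuejs", "vue.js"],
--     "docker": ["containerization", "containers"],
--     "ci/cd": ["cicd", "continuous integration", "continuous deployment", "devops pipeline"],
--     "rest api": ["restful", "rest", "api development"],
--     "graphql": ["gql"],
--     "redis": ["redis cache"],
--     "elasticsearch": ["elastic search", "elk"],
--     "kafka": ["apache kafka", "event streaming"],
--     "microservices": ["micro services", "microservice architecture"],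
--     "data science": ["data analytics", "data analysis"],
--     "tableau": ["tableau desktop"],
--     "power bi": ["powerbi", "microsoft power bi"],
--     ".net": ["dotnet", "asp.net", "c#"],
--     "flutter": ["flutter sdk", "dart flutter"],
--     "react native": ["rn", "react-native"],
-- }
--
-- def normalize_skill(skill: str) -> str:
--     return skill.lower().strip()
--
-- def skills_match(candidate_skill: str, required_skill: str) -> bool:
--     cs = normalize_skill(candidate_skill)
--     rs = normalize_skill(required_skill)
--     if cs == rs:
--         return True
--     # Check synonyms
--     for canonical, synonyms in SKILL_SYNONYMS.items():
--         all_variants = [canonical] + synonyms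
--         if cs in all_variants and rs in all_variants:
--             return True
--     # Substring match
--     if rs in cs or cs in rs:
--         return True
--     return False
-- ===== SOURCE B (Python) =====
-- VARIANT_TO_GROUP = {
--     'react': 'react',
--     'reactjs': 'react',
--     'react.js': 'react',
--     'react js': 'react',
--     'react 18': 'react',
--     'react18': 'react',
--     'node': 'node',
--     'nodejs': 'node',
--     'node.js': 'node',
--     'node js': 'node',
--     'javascript': 'javascript',
--     'js': 'javascript',
--     'es6': 'javascript',
--     'es2015': 'javascript',
--     'ecmascript': 'javascript',
--     'vanilla js': 'javascript',
--     'typescript': 'typescript',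
--     'ts': 'typescript',
--     'python': 'python',
--     'python3': 'python',
--     'python 3': 'python',
--     'machine learning': 'machine learning',
--     'ml': 'machine learning',
--     'machine-learning': 'machine learning',
--     'artificial intelligence': 'artificial intelligence',
--     'ai': 'artificial intelligence',
--     'deep learning': 'artificial intelligence',
--     'dl': 'artificial intelligence',
--     'kubernetes': 'kubernetes',
--     'k8s': 'kubernetes',
--     'postgresql': 'postgresql',
--     'postgres': 'postgresql',
--     'pg': 'postgresql',
--     'mongodb': 'mongodb',
--     'mongo': 'mongodb',
--     'amazon web services': 'amazon web services',
--     'aws': 'amazon web services',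
--     'amazon aws': 'amazon web services',
--     'google cloud': 'google cloud',
--     'gcp': 'google cloud',
--     'google cloud platform': 'google cloud',
--     'microsoft azure': 'microsoft azure',
--     'azure': 'microsoft azure',
--     'spring boot': 'spring boot',
--     'springboot': 'spring boot',
--     'spring': 'spring boot',
--     'angular': 'angular',
--     'angularjs': 'angular',
--     'angular.js': 'angular',
--     'vue': 'vue',
--     'vuejs': 'vue',
--     'vue.js': 'vue',
--     'docker': 'docker',
--     'containerization': 'docker',
--     'containers': 'docker',
--     'ci/cd': 'ci/cd',
--     'cicd': 'ci/cd',
--     'continuous integration': 'ci/cd',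
--     'continuous deployment': 'ci/cd',
--     'devops pipeline': 'ci/cd',
--     'rest api': 'rest api',
--     'restful': 'rest api',
--     'rest': 'rest api',
--     'api development': 'rest api',
--     'graphql': 'graphql',
--     'gql': 'graphql',
--     'redis': 'redis',
--     'redis cache': 'redis',
--     'elasticsearch': 'elasticsearch',
--     'elastic search': 'elasticsearch',
--     'elk': 'elasticsearch',
--     'kafka': 'kafka',
--     'apache kafka': 'kafka',
--     'event streaming': 'kafka',
--     'microservices': 'microservices',
--     'micro services': 'microservices',
--     'microservice architecture': 'microservices',
--     'data science': 'data science',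
--     'data analytics': 'data science',
--     'data analysis': 'data science',
--     'tableau': 'tableau',
--     'tableau desktop': 'tableau',
--     'power bi': 'power bi',
--     'powerbi': 'power bi',
--     'microsoft power bi': 'power bi',
--     '.net': '.net',
--     'dotnet': '.net',
--     'asp.net': '.net',
--     'c#': '.net',
--     'flutter': 'flutter',
--     'flutter sdk': 'flutter',
--     'dart flutter': 'flutter',
--     'react native': 'react native',
--     'rn': 'react native',
--     'react-native': 'react native',
-- }
--
-- def skills_match(candidate_skill: str, required_skill: str) -> bool:
--     cs = candidate_skill.lower().strip()
--     rs = required_skill.lower().strip()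
--     g1 = VARIANT_TO_GROUP.get(cs)
--     g2 = VARIANT_TO_GROUP.get(rs)
--     return (cs == rs
--             or (g1 is not None and g1 == g2)
--             or rs in cs or cs in rs)
-- ===== Notes on version B (the rewrite author's own statement) =====
-- stated objective: simpler
-- what changed: Replaces the per-call scan over all synonym groups (rebuilding [canonical]+synonyms for each group) with a flat module-level inverted table VARIANT_TO_GROUP (variant -> canonical group key), so the synonym check is two dict lookups and one comparison, and the whole function collapses to a single boolean expression.
import Mathlib
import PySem

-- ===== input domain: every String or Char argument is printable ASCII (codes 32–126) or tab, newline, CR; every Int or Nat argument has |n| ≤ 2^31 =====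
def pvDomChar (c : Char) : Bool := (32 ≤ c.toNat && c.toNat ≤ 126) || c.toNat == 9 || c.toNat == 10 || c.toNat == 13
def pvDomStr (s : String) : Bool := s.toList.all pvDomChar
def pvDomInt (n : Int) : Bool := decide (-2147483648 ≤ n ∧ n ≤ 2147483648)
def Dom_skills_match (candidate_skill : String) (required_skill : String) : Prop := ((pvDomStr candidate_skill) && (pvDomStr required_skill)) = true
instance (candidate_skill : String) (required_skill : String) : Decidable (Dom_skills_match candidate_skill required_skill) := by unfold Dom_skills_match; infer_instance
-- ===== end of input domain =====

-- B replaces A's per-call scan over the nested synonym groups with a flat inverted table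
-- (variant -> canonical group key) looked up twice, and a single boolean expression (simpler).



-- ===== PORT A =====
-- the module-level constant SKILL_SYNONYMS (a dict str -> list[str])
def SKILL_SYNONYMS : List (String × List String) := [
  ("react", ["reactjs", "react.js", "react js", "react 18", "react18"]),
  ("node", ["nodejs", "node.js", "node js"]),
  ("javascript", ["js", "es6", "es2015", "ecmascript", "vanilla js"]),
  ("typescript", ["ts"]),
  ("python", ["python3", "python 3"]),
  ("machine learning", ["ml", "machine-learning"]),
  ("artificial intelligence", ["ai", "deep learning", "dl"]),
  ("kubernetes", ["k8s"]),
  ("postgresql", ["postgres", "pg"]),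
  ("mongodb", ["mongo"]),
  ("amazon web services", ["aws", "amazon aws"]),
  ("google cloud", ["gcp", "google cloud platform"]),
  ("microsoft azure", ["azure"]),
  ("spring boot", ["springboot", "spring"]),
  ("angular", ["angularjs", "angular.js"]),
  ("vue", ["vuejs", "vue.js"]),
  ("docker", ["containerization", "containers"]),
  ("ci/cd", ["cicd", "continuous integration", "continuous deployment", "devops pipeline"]),
  ("rest api", ["restful", "rest", "api development"]),
  ("graphql", ["gql"]),
  ("redis", ["redis cache"]),
  ("elasticsearch", ["elastic search", "elk"]),
  ("kafka", ["apache kafka", "event streaming"]),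
  ("microservices", ["micro services", "microservice architecture"]),
  ("data science", ["data analytics", "data analysis"]),
  ("tableau", ["tableau desktop"]),
  ("power bi", ["powerbi", "microsoft power bi"]),
  (".net", ["dotnet", "asp.net", "c#"]),
  ("flutter", ["flutter sdk", "dart flutter"]),
  ("react native", ["rn", "react-native"])]

def normalize_skill (skill : String) : String := PySem.Str.strip (PySem.Str.lower skill)

-- the 'for canonical, synonyms in SKILL_SYNONYMS.items():' loop of A
def synLoop (cs rs : String) : List (String × List String) → Bool
  | [] => false
  | (canonical, synonyms) :: rest =>
      let all_variants := canonical :: synonyms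
      if all_variants.contains cs && all_variants.contains rs then true
      else synLoop cs rs rest

def skills_match (candidate_skill : String) (required_skill : String) : Bool :=
  let cs := normalize_skill candidate_skill
  let rs := normalize_skill required_skill
  if cs == rs then true
  else if synLoop cs rs SKILL_SYNONYMS then true
  else if PySem.Str.isIn rs cs || PySem.Str.isIn cs rs then true
  else false

-- ===== PORT B =====
-- B's module-level flat dict literal: every variant string mapped to its canonical group key
def VARIANT_TO_GROUP : PySem.Dict String String := PySem.Dict.mk [
  ("react", "react"),
  ("reactjs", "react"),
  ("react.js", "react"),
  ("react js", "react"),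
  ("react 18", "react"),
  ("react18", "react"),
  ("node", "node"),
  ("nodejs", "node"),
  ("node.js", "node"),
  ("node js", "node"),
  ("javascript", "javascript"),
  ("js", "javascript"),
  ("es6", "javascript"),
  ("es2015", "javascript"),
  ("ecmascript", "javascript"),
  ("vanilla js", "javascript"),
  ("typescript", "typescript"),
  ("ts", "typescript"),
  ("python", "python"),
  ("python3", "python"),
  ("python 3", "python"),
  ("machine learning", "machine learning"),
  ("ml", "machine learning"),
  ("machine-learning", "machine learning"),
  ("artificial intelligence", "artificial intelligence"),
  ("ai", "artificial intelligence"),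
  ("deep learning", "artificial intelligence"),
  ("dl", "artificial intelligence"),
  ("kubernetes", "kubernetes"),
  ("k8s", "kubernetes"),
  ("postgresql", "postgresql"),
  ("postgres", "postgresql"),
  ("pg", "postgresql"),
  ("mongodb", "mongodb"),
  ("mongo", "mongodb"),
  ("amazon web services", "amazon web services"),
  ("aws", "amazon web services"),
  ("amazon aws", "amazon web services"),
  ("google cloud", "google cloud"),
  ("gcp", "google cloud"),
  ("google cloud platform", "google cloud"),
  ("microsoft azure", "microsoft azure"),
  ("azure", "microsoft azure"),
  ("spring boot", "spring boot"),
  ("springboot", "spring boot"),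
  ("spring", "spring boot"),
  ("angular", "angular"),
  ("angularjs", "angular"),
  ("angular.js", "angular"),
  ("vue", "vue"),
  ("vuejs", "vue"),
  ("vue.js", "vue"),
  ("docker", "docker"),
  ("containerization", "docker"),
  ("containers", "docker"),
  ("ci/cd", "ci/cd"),
  ("cicd", "ci/cd"),
  ("continuous integration", "ci/cd"),
  ("continuous deployment", "ci/cd"),
  ("devops pipeline", "ci/cd"),
  ("rest api", "rest api"),
  ("restful", "rest api"),
  ("rest", "rest api"),
  ("api development", "rest api"),
  ("graphql", "graphql"),
  ("gql", "graphql"),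
  ("redis", "redis"),
  ("redis cache", "redis"),
  ("elasticsearch", "elasticsearch"),
  ("elastic search", "elasticsearch"),
  ("elk", "elasticsearch"),
  ("kafka", "kafka"),
  ("apache kafka", "kafka"),
  ("event streaming", "kafka"),
  ("microservices", "microservices"),
  ("micro services", "microservices"),
  ("microservice architecture", "microservices"),
  ("data science", "data science"),
  ("data analytics", "data science"),
  ("data analysis", "data science"),
  ("tableau", "tableau"),
  ("tableau desktop", "tableau"),
  ("power bi", "power bi"),
  ("powerbi", "power bi"),
  ("microsoft power bi", "power bi"),
  (".net", ".net"),
  ("dotnet", ".net"),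
  ("asp.net", ".net"),
  ("c#", ".net"),
  ("flutter", "flutter"),
  ("flutter sdk", "flutter"),
  ("dart flutter", "flutter"),
  ("react native", "react native"),
  ("rn", "react native"),
  ("react-native", "react native")]

def skills_match_alt (candidate_skill : String) (required_skill : String) : Bool :=
  let cs := PySem.Str.strip (PySem.Str.lower candidate_skill)
  let rs := PySem.Str.strip (PySem.Str.lower required_skill)
  let g1 := VARIANT_TO_GROUP.get? cs
  let g2 := VARIANT_TO_GROUP.get? rs
  (cs == rs) || (g1.isSome && g1 == g2) || PySem.Str.isIn rs cs || PySem.Str.isIn cs rs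

-- ===== PRECONDITION & SPEC =====
def Spec_skills_match (candidate_skill : String) (required_skill : String) (out : Bool) : Prop := out = skills_match_alt candidate_skill required_skill
instance (candidate_skill : String) (required_skill : String) (out : Bool) : Decidable (Spec_skills_match candidate_skill required_skill out) := by unfold Spec_skills_match; infer_instance

-- ===== CLAIM =====
def Claim_equal_skills_match : Prop := ∀ (candidate_skill : String) (required_skill : String), Dom_skills_match candidate_skill required_skill → Spec_skills_match candidate_skill required_skill (skills_match candidate_skill required_skill)

-- ===== LEMMAS AND PROOFS =====

-- first-match group lookup, the reference form both ports are related to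
def lkp (x : String) : List (String × List String) → Option String
  | [] => none
  | p :: rest => if (p.1 :: p.2).contains x then some p.1 else lkp x rest

-- all variant strings of all groups, in order
def keysFlat (gs : List (String × List String)) : List String :=
  gs.flatMap (fun p => p.1 :: p.2)

theorem synLoop_cons (cs rs : String) (p : String × List String) (rest : List (String × List String)) :
    synLoop cs rs (p :: rest) =
      if (p.1 :: p.2).contains cs && (p.1 :: p.2).contains rs then true
      else synLoop cs rs rest := rfl

theorem lkp_cons (x : String) (p : String × List String) (rest : List (String × List String)) :
    lkp x (p :: rest) = if (p.1 :: p.2).contains x then some p.1 else lkp x rest := rfl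

theorem keysFlat_cons (p : String × List String) (rest : List (String × List String)) :
    keysFlat (p :: rest) = (p.1 :: p.2) ++ keysFlat rest := by simp [keysFlat]

theorem lkp_eq_none_of_not_mem (x : String) (gs : List (String × List String))
    (h : x ∉ keysFlat gs) : lkp x gs = none := by
  induction gs with
  | nil => rfl
  | cons p rest ih =>
    rw [keysFlat_cons, List.mem_append] at h
    push Not at h
    rw [lkp_cons, if_neg (by simpa using h.1), ih h.2]

theorem lkp_mem (x c : String) (gs : List (String × List String))
    (h : lkp x gs = some c) : c ∈ keysFlat gs := by
  induction gs with
  | nil => simp [lkp] at h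
  | cons p rest ih =>
    rw [keysFlat_cons, List.mem_append]
    rw [lkp_cons] at h
    by_cases hc : x ∈ p.1 :: p.2
    · rw [if_pos (by simpa using hc)] at h
      obtain rfl := Option.some_inj.mp h
      exact Or.inl (List.mem_cons_self)
    · rw [if_neg (by simpa using hc)] at h
      exact Or.inr (ih h)

-- A's loop agrees with two reference lookups when no variant occurs in two groups
theorem synLoop_eq_lkp (cs rs : String) (gs : List (String × List String))
    (hnd : (keysFlat gs).Nodup) :
    synLoop cs rs gs = ((lkp cs gs).isSome && (lkp cs gs == lkp rs gs)) := by
  induction gs with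
  | nil => rfl
  | cons p rest ih =>
    rw [keysFlat_cons, List.nodup_append] at hnd
    obtain ⟨-, hnd2, hdisj⟩ := hnd
    have ih' := ih hnd2
    rw [synLoop_cons, lkp_cons, lkp_cons]
    by_cases hc : ((p.1 :: p.2).contains cs) = true
    · have hcs : cs ∈ p.1 :: p.2 := by simpa using hc
      by_cases hr : ((p.1 :: p.2).contains rs) = true
      · rw [hc, hr]; simp
      · have hr' : ((p.1 :: p.2).contains rs) = false := by simpa using hr
        rw [hc, hr']
        have hlkp_cs : lkp cs rest = none :=
          lkp_eq_none_of_not_mem cs rest (fun hmem => hdisj cs hcs cs hmem rfl)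
        rcases hck : lkp rs rest with _ | c
        · simp [ih', hlkp_cs, hck]
        · have hne : p.1 ≠ c :=
            hdisj p.1 List.mem_cons_self c (lkp_mem rs c rest hck)
          simp [ih', hlkp_cs, hck, hne]
    · have hc' : ((p.1 :: p.2).contains cs) = false := by simpa using hc
      by_cases hr : ((p.1 :: p.2).contains rs) = true
      · have hrs : rs ∈ p.1 :: p.2 := by simpa using hr
        rw [hc', hr]
        have hlkp_rs : lkp rs rest = none :=
          lkp_eq_none_of_not_mem rs rest (fun hmem => hdisj rs hrs rs hmem rfl)
        rcases hck : lkp cs rest with _ | c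
        · simp [ih', hlkp_rs, hck]
        · have hne : p.1 ≠ c :=
            hdisj p.1 List.mem_cons_self c (lkp_mem cs c rest hck)
          simp [ih', hlkp_rs, hck]
          exact Ne.symm hne
      · have hr' : ((p.1 :: p.2).contains rs) = false := by simpa using hr
        rw [hc', hr']
        simpa using ih'

-- the flat association list A's nested table flattens to (canonical first, then synonyms)
def idxOf (gs : List (String × List String)) : List (String × String) :=
  gs.flatMap (fun p => (p.1 :: p.2).map (fun v => (v, p.1)))

theorem get?_mk_seg (vs : List String) (c : String) (t : List (String × String)) (x : String) :
    (PySem.Dict.mk (vs.map (fun v => (v, c)) ++ t)).get? x =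
      if vs.contains x then some c else (PySem.Dict.mk t).get? x := by
  induction vs with
  | nil => simp
  | cons v rest ih =>
    simp only [List.map_cons, List.cons_append, PySem.Dict.get?_mk_cons, ih, List.contains_cons]
    by_cases hv : v = x
    · subst hv; simp
    · have h1 : (v == x) = false := by simpa using hv
      have h2 : (x == v) = false := by simpa using fun h => hv h.symm
      rw [h1, h2]
      simp

theorem get?_mk_idxOf (x : String) (gs : List (String × List String)) :
    (PySem.Dict.mk (idxOf gs)).get? x = lkp x gs := by
  induction gs with
  | nil => rfl
  | cons p rest ih =>
    have hsplit : idxOf (p :: rest) = (p.1 :: p.2).map (fun v => (v, p.1)) ++ idxOf rest := by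
      simp [idxOf]
    rw [hsplit, get?_mk_seg, lkp_cons, ih]

set_option maxRecDepth 100000 in
set_option maxHeartbeats 4000000 in
theorem VARIANT_TO_GROUP_eq : VARIANT_TO_GROUP = PySem.Dict.mk (idxOf SKILL_SYNONYMS) := by decide

set_option maxRecDepth 100000 in
set_option maxHeartbeats 4000000 in
theorem keysFlat_nodup : (keysFlat SKILL_SYNONYMS).Nodup := by decide

theorem get?_VTG (x : String) : VARIANT_TO_GROUP.get? x = lkp x SKILL_SYNONYMS := by
  rw [VARIANT_TO_GROUP_eq, get?_mk_idxOf]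

theorem skills_match_core (cs rs : String) :
    (if cs == rs then true
     else if synLoop cs rs SKILL_SYNONYMS then true
     else if PySem.Str.isIn rs cs || PySem.Str.isIn cs rs then true else false)
    = ((cs == rs) || ((VARIANT_TO_GROUP.get? cs).isSome && (VARIANT_TO_GROUP.get? cs == VARIANT_TO_GROUP.get? rs))
        || PySem.Str.isIn rs cs || PySem.Str.isIn cs rs) := by
  rw [synLoop_eq_lkp cs rs SKILL_SYNONYMS keysFlat_nodup, get?_VTG, get?_VTG]
  cases cs == rs <;>
    cases (lkp cs SKILL_SYNONYMS).isSome && (lkp cs SKILL_SYNONYMS == lkp rs SKILL_SYNONYMS) <;>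
      cases PySem.Str.isIn rs cs <;> cases PySem.Str.isIn cs rs <;> rfl

-- ===== VERDICT =====
theorem skills_match_spec : Claim_equal_skills_match := by
  intro candidate_skill required_skill _
  unfold Spec_skills_match
  simp only [skills_match, skills_match_alt, normalize_skill]
  exact skills_match_core _ _
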